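-- pv_equiv track=rewrite | github.com/cirosantilli/project-euler-solvers | solvers/137.py | nugget
-- ===== SOURCE A (Python) =====
-- def mulmod(a: int, b: int, modulo: int) -> int:
--     return (a * b) % modulo
--
-- def nugget(n: int, modulo: int) -> int:
--     n *= 2
--     fibo = [[1, 1], [1, 0]]
--     result = [[1, 0], [0, 1]]
--
--     while n > 0:
--         if n & 1:
--             t00 = mulmod(result[0][0], fibo[0][0], modulo) + mulmod(
--                 result[0][1], fibo[1][0], modulo
--             )
--             t01 = mulmod(result[0][0], fibo[0][1], modulo) + mulmod(
--                 result[0][1], fibo[1][1], modulo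
--             )
--             t10 = mulmod(result[1][0], fibo[0][0], modulo) + mulmod(
--                 result[1][1], fibo[1][0], modulo
--             )
--             t11 = mulmod(result[1][0], fibo[0][1], modulo) + mulmod(
--                 result[1][1], fibo[1][1], modulo
--             )
--
--             if t00 >= modulo:
--                 t00 -= modulo
--             if t01 >= modulo:
--                 t01 -= modulo
--             if t10 >= modulo:
--                 t10 -= modulo
--             if t11 >= modulo:
--                 t11 -= modulo
--
--             result = [[t00, t01], [t10, t11]]
--
--         t00 = mulmod(fibo[0][0], fibo[0][0], modulo) + mulmod(
--             fibo[0][1], fibo[1][0], modulo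
--         )
--         t01 = mulmod(fibo[0][0], fibo[0][1], modulo) + mulmod(
--             fibo[0][1], fibo[1][1], modulo
--         )
--         t10 = mulmod(fibo[1][0], fibo[0][0], modulo) + mulmod(
--             fibo[1][1], fibo[1][0], modulo
--         )
--         t11 = mulmod(fibo[1][0], fibo[0][1], modulo) + mulmod(
--             fibo[1][1], fibo[1][1], modulo
--         )
--
--         if t00 >= modulo:
--             t00 -= modulo
--         if t01 >= modulo:
--             t01 -= modulo
--         if t10 >= modulo:
--             t10 -= modulo
--         if t11 >= modulo:
--             t11 -= modulo
--
--         fibo = [[t00, t01], [t10, t11]]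
--         n >>= 1
--
--     return (result[0][0] * result[0][1]) % modulo
-- ===== SOURCE B (Python) =====
-- def nugget(n: int, modulo: int) -> int:
--     # Fibonacci fast doubling: fd(k) = (F(k) % modulo, F(k+1) % modulo), k <= 0 treated as 0.
--     def fd(k):
--         if k <= 0:
--             return (0 % modulo, 1 % modulo)
--         f, g = fd(k >> 1)
--         a = f * (2 * g - f) % modulo      # F(2i)
--         b = (f * f + g * g) % modulo      # F(2i+1)
--         if k & 1:
--             return (b, (a + b) % modulo)
--         return (a, b)
--     f, g = fd(2 * n)
--     return (f * g) % modulo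
-- ===== Notes on version B (the rewrite author's own statement) =====
-- stated objective: simpler
-- what changed: Replaces A's 2x2 Fibonacci-matrix binary exponentiation (identity/result matrix accumulator with conditional subtract reductions) by the fast-doubling recursion on the pair (F(k) mod m, F(k+1) mod m), returning F(2n)*F(2n+1) mod m.
import Mathlib
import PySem

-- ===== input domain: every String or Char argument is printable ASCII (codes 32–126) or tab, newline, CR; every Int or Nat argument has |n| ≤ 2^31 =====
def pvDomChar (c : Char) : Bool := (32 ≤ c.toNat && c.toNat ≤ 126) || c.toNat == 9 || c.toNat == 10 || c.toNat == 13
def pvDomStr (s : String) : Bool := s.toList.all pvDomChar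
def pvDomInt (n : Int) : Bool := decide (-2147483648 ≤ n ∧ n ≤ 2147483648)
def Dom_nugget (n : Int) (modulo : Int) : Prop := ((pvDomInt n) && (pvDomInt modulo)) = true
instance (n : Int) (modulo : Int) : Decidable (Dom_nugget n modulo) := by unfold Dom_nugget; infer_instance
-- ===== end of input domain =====

-- B replaces A's 2x2 matrix binary exponentiation by Fibonacci fast doubling on the pair
-- (F(k), F(k+1)); objective: simpler (no matrices, a short recursion). Return value only.

-- ===== PORT A =====
def mulmod (a : Int) (b : Int) (modulo : Int) : Int := PySem.Int.mod (a * b) modulo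

-- while n > 0 loop of A; state = fibo matrix (f..) and result matrix (r..); returns (result[0][0], result[0][1])
def nuggetLoop (modulo : Int) (k : Int) (f00 f01 f10 f11 r00 r01 r10 r11 : Int) : Int × Int :=
  if h : 0 < k then
    let s :=
      if k % 2 = 1 then
        let t00 := mulmod r00 f00 modulo + mulmod r01 f10 modulo
        let t01 := mulmod r00 f01 modulo + mulmod r01 f11 modulo
        let t10 := mulmod r10 f00 modulo + mulmod r11 f10 modulo
        let t11 := mulmod r10 f01 modulo + mulmod r11 f11 modulo
        let t00 := if t00 ≥ modulo then t00 - modulo else t00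
        let t01 := if t01 ≥ modulo then t01 - modulo else t01
        let t10 := if t10 ≥ modulo then t10 - modulo else t10
        let t11 := if t11 ≥ modulo then t11 - modulo else t11
        (t00, t01, t10, t11)
      else (r00, r01, r10, r11)
    let u00 := mulmod f00 f00 modulo + mulmod f01 f10 modulo
    let u01 := mulmod f00 f01 modulo + mulmod f01 f11 modulo
    let u10 := mulmod f10 f00 modulo + mulmod f11 f10 modulo
    let u11 := mulmod f10 f01 modulo + mulmod f11 f11 modulo
    let u00 := if u00 ≥ modulo then u00 - modulo else u00
    let u01 := if u01 ≥ modulo then u01 - modulo else u01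
    let u10 := if u10 ≥ modulo then u10 - modulo else u10
    let u11 := if u11 ≥ modulo then u11 - modulo else u11
    nuggetLoop modulo (k / 2) u00 u01 u10 u11 s.1 s.2.1 s.2.2.1 s.2.2.2
  else (r00, r01)
termination_by k.toNat
decreasing_by omega

def nugget (n : Int) (modulo : Int) : Int :=
  let k := n * 2
  let r := nuggetLoop modulo k 1 1 1 0 1 0 0 1
  PySem.Int.mod (r.1 * r.2) modulo

-- ===== PORT B =====
-- fast doubling: fd modulo k = (F(k) % modulo, F(k+1) % modulo), k ≤ 0 treated as 0
def fd (modulo : Int) (k : Int) : Int × Int :=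
  if _h : k ≤ 0 then (PySem.Int.mod 0 modulo, PySem.Int.mod 1 modulo)
  else
    let p := fd modulo (k / 2)
    let f := p.1
    let g := p.2
    let a := PySem.Int.mod (f * (2 * g - f)) modulo
    let b := PySem.Int.mod (f * f + g * g) modulo
    if k % 2 = 1 then (b, PySem.Int.mod (a + b) modulo) else (a, b)
termination_by k.toNat
decreasing_by omega

def nugget_alt (n : Int) (modulo : Int) : Int :=
  let p := fd modulo (2 * n)
  PySem.Int.mod (p.1 * p.2) modulo

-- ===== PRECONDITION & SPEC =====
-- Pre_ excludes only modulo = 0, where Python A raises ZeroDivisionError (as does B).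
def Pre_nugget (n : Int) (modulo : Int) : Prop := modulo ≠ 0
instance (n : Int) (modulo : Int) : Decidable (Pre_nugget n modulo) := by unfold Pre_nugget; infer_instance
def pvWitness_nugget : Int × Int := (5, 1000)

def Spec_nugget (n : Int) (modulo : Int) (out : Int) : Prop := out = nugget_alt n modulo
instance (n : Int) (modulo : Int) (out : Int) : Decidable (Spec_nugget n modulo out) := by unfold Spec_nugget; infer_instance

-- ===== CLAIM (what is proved, stated in full; the proofs are below) =====
def Claim_equal_nugget : Prop := ∀ (n : Int) (modulo : Int), Dom_nugget n modulo → Pre_nugget n modulo → Spec_nugget n modulo (nugget n modulo)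

-- ===== LEMMAS AND PROOFS =====

-- congruence toolkit
theorem emod_emod (a m : Int) : a % m % m = a % m := Int.emod_emod_of_dvd a dvd_rfl

theorem pymod_emod (a m : Int) : PySem.Int.mod a m % m = a % m := by
  have h := Int.fmod_add_mul_fdiv a m
  show a.fmod m % m = a % m
  calc a.fmod m % m = (a - m * a.fdiv m) % m := by rw [show a.fmod m = a - m * a.fdiv m from by linarith]
  _ = a % m := by rw [Int.sub_emod, Int.mul_emod_right, sub_zero, emod_emod]

theorem pymod_congr {m a b : Int} (h : a % m = b % m) : PySem.Int.mod a m = PySem.Int.mod b m := by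
  have hd : m ∣ a - b := by
    have h0 : (a - b) % m = 0 := by rw [Int.sub_emod, h, sub_self, Int.zero_emod]
    exact Int.dvd_of_emod_eq_zero h0
  obtain ⟨t, ht⟩ := hd
  have ha : a = b + m * t := by linarith
  show a.fmod m = b.fmod m
  rw [ha]; exact Int.add_mul_fmod_self_left b m t

theorem ifsub_emod (t m : Int) : (if t ≥ m then t - m else t) % m = t % m := by
  split_ifs with h
  · rw [Int.sub_emod, Int.emod_self, sub_zero, emod_emod]
  · rfl

theorem mul_cong {m a b a' b' : Int} (ha : a % m = a' % m) (hb : b % m = b' % m) :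
    (a * b) % m = (a' * b') % m := by
  rw [Int.mul_emod, ha, hb, ← Int.mul_emod]

theorem addmul_cong {m a b c d a' b' c' d' : Int}
    (ha : a % m = a' % m) (hb : b % m = b' % m) (hc : c % m = c' % m) (hd : d % m = d' % m) :
    (mulmod a b m + mulmod c d m) % m = (a' * b' + c' * d') % m := by
  unfold mulmod
  rw [Int.add_emod, pymod_emod, pymod_emod, ← Int.add_emod, Int.add_emod (a*b),
    mul_cong ha hb, mul_cong hc hd, ← Int.add_emod]

theorem step_cong {m a b c d a' b' c' d' : Int}
    (ha : a % m = a' % m) (hb : b % m = b' % m) (hc : c % m = c' % m) (hd : d % m = d' % m) :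
    (if mulmod a b m + mulmod c d m ≥ m then mulmod a b m + mulmod c d m - m
     else mulmod a b m + mulmod c d m) % m = (a' * b' + c' * d') % m := by
  rw [ifsub_emod, addmul_cong ha hb hc hd]

-- Fibonacci identities over Int
theorem fib_sq (p : Nat) : ((Nat.fib (2*p+1) : Int)) = (Nat.fib (p+1) : Int) * Nat.fib (p+1) + (Nat.fib p : Int) * Nat.fib p := by
  have := Nat.fib_two_mul_add_one p
  have : ((Nat.fib (2*p+1) : Int)) = ((Nat.fib (p+1))^2 + (Nat.fib p)^2 : Nat) := by exact_mod_cast congrArg (Nat.cast (R := Int)) this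
  rw [this]; push_cast; ring

theorem fib_dbl (p : Nat) : ((Nat.fib (2*p) : Int)) = (Nat.fib p : Int) * (2 * Nat.fib (p+1) - Nat.fib p) := by
  have hle : Nat.fib p ≤ 2 * Nat.fib (p+1) := by
    have h1 : Nat.fib p ≤ Nat.fib (p+1) := Nat.fib_mono (by omega)
    omega
  have := Nat.fib_two_mul p
  have h2 : ((Nat.fib (2*p) : Int)) = ((Nat.fib p * (2 * Nat.fib (p+1) - Nat.fib p) : Nat) : Int) := by
    exact_mod_cast congrArg (Nat.cast (R := Int)) this
  rw [h2]; push_cast [hle]; ring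

theorem fib_dbl' (p : Nat) :
    ((Nat.fib (2*p+1) : Int)) - Nat.fib (2*p) = (Nat.fib p : Int) * Nat.fib p + ((Nat.fib (p+1) : Int) - Nat.fib p) * ((Nat.fib (p+1) : Int) - Nat.fib p) := by
  rw [fib_sq, fib_dbl]; ring

theorem fib_addf (q p : Nat) : ((Nat.fib (q+p+1) : Int)) = (Nat.fib q : Int) * Nat.fib p + (Nat.fib (q+1) : Int) * Nat.fib (p+1) := by
  have := Nat.fib_add q p
  exact_mod_cast congrArg (Nat.cast (R := Int)) this

theorem fib_addf' (q p : Nat) (hp : 1 ≤ p) :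
    ((Nat.fib (q+p) : Int)) = (Nat.fib (q+1) : Int) * Nat.fib p + (Nat.fib q : Int) * ((Nat.fib (p+1) : Int) - Nat.fib p) := by
  obtain ⟨p', rfl⟩ : ∃ p', p = p' + 1 := ⟨p - 1, by omega⟩
  have h1 : ((Nat.fib (q + (p'+1)) : Int)) = (Nat.fib q : Int) * Nat.fib p' + (Nat.fib (q+1) : Int) * Nat.fib (p'+1) := by
    have := Nat.fib_add q p'
    have h : q + (p'+1) = q + p' + 1 := by ring
    rw [h]; exact_mod_cast congrArg (Nat.cast (R := Int)) this
  have h2 : ((Nat.fib (p'+1+1) : Int)) = (Nat.fib p' : Int) + Nat.fib (p'+1) := by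
    have := @Nat.fib_add_two p'
    exact_mod_cast congrArg (Nat.cast (R := Int)) this
  rw [h1, h2]; ring

-- A-side loop invariant
theorem nuggetLoop_inv (m : Int) (K : Nat) : ∀ (k : Int), k.toNat = K → ∀ (p q : Nat), 1 ≤ p →
    ∀ f00 f01 f10 f11 r00 r01 r10 r11 : Int,
    f00 % m = (Nat.fib (p+1) : Int) % m →
    f01 % m = (Nat.fib p : Int) % m →
    f10 % m = (Nat.fib p : Int) % m →
    f11 % m = ((Nat.fib (p+1) : Int) - Nat.fib p) % m →
    r00 % m = (Nat.fib (q+1) : Int) % m →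
    r01 % m = (Nat.fib q : Int) % m →
    (nuggetLoop m k f00 f01 f10 f11 r00 r01 r10 r11).1 % m = (Nat.fib (q + K * p + 1) : Int) % m ∧
    (nuggetLoop m k f00 f01 f10 f11 r00 r01 r10 r11).2 % m = (Nat.fib (q + K * p) : Int) % m := by
  induction K using Nat.strong_induction_on with
  | _ K ih =>
    intro k hk p q hp f00 f01 f10 f11 r00 r01 r10 r11 hf00 hf01 hf10 hf11 hr00 hr01
    by_cases hpos : 0 < k
    · rw [nuggetLoop, dif_pos hpos]
      have hK : K = k.toNat := hk.symm
      have hKpos : 1 ≤ K := by omega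
      have hk2 : (k / 2).toNat = K / 2 := by omega
      have hlt : K / 2 < K := by omega
      -- new fibo matrix ≡ fib matrix at 2p
      have hu00 := step_cong (m := m) hf00 hf00 hf01 hf10
      have hu01 := step_cong (m := m) hf00 hf01 hf01 hf11
      have hu10 := step_cong (m := m) hf10 hf00 hf11 hf10
      have hu11 := step_cong (m := m) hf10 hf01 hf11 hf11
      rw [show (Nat.fib (p+1) : Int) * Nat.fib (p+1) + (Nat.fib p : Int) * Nat.fib p
            = (Nat.fib (2*p+1) : Int) by rw [fib_sq]] at hu00
      rw [show (Nat.fib (p+1) : Int) * Nat.fib p + (Nat.fib p : Int) * ((Nat.fib (p+1) : Int) - Nat.fib p)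
            = (Nat.fib (2*p) : Int) by rw [fib_dbl]; ring] at hu01
      rw [show (Nat.fib p : Int) * Nat.fib (p+1) + ((Nat.fib (p+1) : Int) - Nat.fib p) * Nat.fib p
            = (Nat.fib (2*p) : Int) by rw [fib_dbl]; ring] at hu10
      rw [show (Nat.fib p : Int) * Nat.fib p + ((Nat.fib (p+1) : Int) - Nat.fib p) * ((Nat.fib (p+1) : Int) - Nat.fib p)
            = (Nat.fib (2*p+1) : Int) - Nat.fib (2*p) by rw [fib_dbl']] at hu11
      by_cases hodd : k % 2 = 1
      · -- odd bit: result ← result * fibo, index advances by p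
        rw [if_pos hodd]
        have hs00 := step_cong (m := m) hr00 hf00 hr01 hf10
        have hs01 := step_cong (m := m) hr00 hf01 hr01 hf11
        rw [show (Nat.fib (q+1) : Int) * Nat.fib (p+1) + (Nat.fib q : Int) * Nat.fib p
              = (Nat.fib (q+p+1) : Int) by rw [fib_addf]; ring] at hs00
        rw [show (Nat.fib (q+1) : Int) * Nat.fib p + (Nat.fib q : Int) * ((Nat.fib (p+1) : Int) - Nat.fib p)
              = (Nat.fib (q+p) : Int) by rw [fib_addf' q p hp]] at hs01
        obtain ⟨j, hj⟩ : ∃ j, j = K / 2 := ⟨_, rfl⟩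
        have hidx2 : q + K * p = q + p + j * (2*p) := by
          rw [show K = 2*j+1 from by omega]; ring
        have hidx1 : q + K * p + 1 = q + p + j * (2*p) + 1 := by rw [hidx2]
        rw [hidx1, hidx2, hj]
        exact ih (K / 2) hlt (k / 2) hk2 (2*p) (q+p) (by omega)
          _ _ _ _ _ _ _ _ hu00 hu01 hu10 hu11 hs00 hs01
      · -- even bit: result unchanged
        rw [if_neg hodd]
        obtain ⟨j, hj⟩ : ∃ j, j = K / 2 := ⟨_, rfl⟩
        have hidx2 : q + K * p = q + j * (2*p) := by
          rw [show K = 2*j from by omega]; ring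
        have hidx1 : q + K * p + 1 = q + j * (2*p) + 1 := by rw [hidx2]
        rw [hidx1, hidx2, hj]
        exact ih (K / 2) hlt (k / 2) hk2 (2*p) q (by omega)
          _ _ _ _ _ _ _ _ hu00 hu01 hu10 hu11 hr00 hr01
    · rw [nuggetLoop, dif_neg hpos]
      have hK0 : K = 0 := by omega
      subst hK0
      simpa using ⟨hr00, hr01⟩

-- B-side fast-doubling invariant
theorem fd_inv (m : Int) (K : Nat) : ∀ (k : Int), k.toNat = K →
    (fd m k).1 % m = (Nat.fib K : Int) % m ∧ (fd m k).2 % m = (Nat.fib (K+1) : Int) % m := by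
  induction K using Nat.strong_induction_on with
  | _ K ih =>
    intro k hk
    by_cases hle : k ≤ 0
    · rw [fd, dif_pos hle]
      have hK0 : K = 0 := by omega
      subst hK0
      simp [pymod_emod, Nat.fib]
    · rw [fd, dif_neg hle]
      have hKpos : 1 ≤ K := by omega
      have hk2 : (k / 2).toNat = K / 2 := by omega
      have hlt : K / 2 < K := by omega
      obtain ⟨hf, hg⟩ := ih (K / 2) hlt (k / 2) hk2
      set i := K / 2 with hi
      set f := (fd m (k / 2)).1
      set g := (fd m (k / 2)).2
      have hsub : (2 * g - f) % m = (2 * (Nat.fib (i+1) : Int) - Nat.fib i) % m := by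
        rw [Int.sub_emod, Int.mul_emod, hg, hf, ← Int.mul_emod, ← Int.sub_emod]
      have ha : PySem.Int.mod (f * (2 * g - f)) m % m = (Nat.fib (2*i) : Int) % m := by
        rw [pymod_emod, fib_dbl]; exact mul_cong hf hsub
      have hb : PySem.Int.mod (f * f + g * g) m % m = (Nat.fib (2*i+1) : Int) % m := by
        rw [pymod_emod, fib_sq, Int.add_emod, mul_cong hf hf, mul_cong hg hg, ← Int.add_emod]
        ring_nf
      by_cases hodd : k % 2 = 1
      · rw [if_pos hodd]
        have hKodd : K = 2 * i + 1 := by omega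
        constructor
        · simpa [hKodd] using hb
        · have hab : PySem.Int.mod (PySem.Int.mod (f * (2 * g - f)) m + PySem.Int.mod (f * f + g * g) m) m % m
              = (Nat.fib (2*i+2) : Int) % m := by
            have h2 : (Nat.fib (2*i+2) : Int) = (Nat.fib (2*i) : Int) + Nat.fib (2*i+1) := by
              have := @Nat.fib_add_two (2*i)
              exact_mod_cast congrArg (Nat.cast (R := Int)) this
            rw [pymod_emod, Int.add_emod, ha, hb, ← Int.add_emod, h2]
          simpa [hKodd, show 2*i+1+1 = 2*i+2 by ring] using hab
      · rw [if_neg hodd]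
        have hKeven : K = 2 * i := by omega
        exact ⟨by simpa [hKeven] using ha, by simpa [hKeven] using hb⟩

-- ===== VERDICT (by name: the statement is the Claim_ definition above) =====
theorem nugget_spec : Claim_equal_nugget := by
  intro n m _ _
  unfold Spec_nugget nugget nugget_alt
  obtain ⟨hA1, hA2⟩ := nuggetLoop_inv m (n*2).toNat (n*2) rfl 1 0 (le_refl 1)
    1 1 1 0 1 0 0 1 (by norm_num) (by norm_num) (by norm_num) (by norm_num) (by norm_num) (by norm_num)
  simp only [zero_add, mul_one] at hA1 hA2
  obtain ⟨hB1, hB2⟩ := fd_inv m (2*n).toNat (2*n) rfl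
  have hkk : (2*n).toNat = (n*2).toNat := by omega
  rw [hkk] at hB1 hB2
  apply pymod_congr
  rw [Int.mul_emod, hA1, hA2, Int.mul_emod (fd m (2*n)).1, hB1, hB2]
  exact congrArg (· % m) (Int.mul_comm _ _)
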